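-- pv_equiv track=rewrite | github.com/Jackiecoder/Leetcode | Python/CodeSignal/sumOfTwoString.py | sumOfTwoString
-- ===== SOURCE A (Python) =====
-- def sumOfTwoString(s1, s2):
--     n, m = len(s1), len(s2)
--     i, j = n - 1, m - 1
--     res = ''
--     while i >= 0 and j >= 0:
--         res = str(ord(s1[i]) - ord('0') + ord(s2[j]) - ord('0')) + res
--         i -= 1
--         j -= 1
--     while i >= 0:
--         res = str(ord(s1[i]) - ord('0')) + res
--         i -= 1
--     while j >= 0:
--         res = str(ord(s2[j]) - ord('0')) + res
--         j -= 1
--     return res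
-- ===== SOURCE B (Python) =====
-- def sumOfTwoString(s1, s2):
--     diff = len(s1) - len(s2)
--     if diff > 0:
--         s2 = '0' * diff + s2
--     elif diff < 0:
--         s1 = '0' * (-diff) + s1
--     parts = []
--     for a, b in zip(s1, s2):
--         parts.append(str(ord(a) - ord('0') + ord(b) - ord('0')))
--     return ''.join(parts)
-- ===== Notes on version B (the rewrite author's own statement) =====
-- stated objective: faster
-- what changed: Replaces A's three backward index-decrementing while loops that each prepend to the result string (quadratic string rebuilding) with left-padding the shorter string with '0' and one forward zip pass collected into a list and joined once.
import Mathlib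
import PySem

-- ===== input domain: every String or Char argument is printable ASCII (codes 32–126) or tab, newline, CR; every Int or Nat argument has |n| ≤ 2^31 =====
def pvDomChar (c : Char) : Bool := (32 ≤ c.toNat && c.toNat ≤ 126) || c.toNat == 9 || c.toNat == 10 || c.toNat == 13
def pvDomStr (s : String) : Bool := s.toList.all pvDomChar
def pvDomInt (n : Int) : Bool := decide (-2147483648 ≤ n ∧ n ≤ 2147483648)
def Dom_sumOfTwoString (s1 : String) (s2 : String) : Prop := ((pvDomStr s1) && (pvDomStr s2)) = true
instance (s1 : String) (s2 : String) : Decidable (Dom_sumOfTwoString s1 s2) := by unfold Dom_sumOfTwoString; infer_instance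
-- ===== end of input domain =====

-- B left-pads the shorter string with '0' and does one forward zip pass (ord arithmetic kept),
-- replacing A's three backward while loops that prepend to the result.

-- ===== PORT A =====
-- str(ord(c) - ord('0'))  as a char list ('0'.toNat = 48)
def pvDigStr (c : Char) : List Char := PySem.Int.toChars ((c.toNat : Int) - 48)

-- str(ord(a) - ord('0') + ord(b) - ord('0'))
def pvSumStr (a b : Char) : List Char :=
  PySem.Int.toChars ((a.toNat : Int) - 48 + ((b.toNat : Int) - 48))

-- 'while i >= 0: res = str(ord(s1[i]) - ord('0')) + res; i -= 1'  (strings handled as char lists)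
def pvLoop1 (l : List Char) (i : Int) (res : List Char) : List Char :=
  if _h : 0 ≤ i then pvLoop1 l (i - 1) (pvDigStr (PySem.List.pyGetD l i ' ') ++ res) else res
termination_by (i + 1).toNat
decreasing_by omega

-- the third while loop (over s2, index j) — same shape
def pvLoop2 (l : List Char) (j : Int) (res : List Char) : List Char :=
  if _h : 0 ≤ j then pvLoop2 l (j - 1) (pvDigStr (PySem.List.pyGetD l j ' ') ++ res) else res
termination_by (j + 1).toNat
decreasing_by omega

-- 'while i >= 0 and j >= 0: …'; when it exits, the two single-index loops run in order
def pvLoopBoth (l1 l2 : List Char) (i j : Int) (res : List Char) : List Char :=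
  if _h : 0 ≤ i ∧ 0 ≤ j then
    pvLoopBoth l1 l2 (i - 1) (j - 1)
      (pvSumStr (PySem.List.pyGetD l1 i ' ') (PySem.List.pyGetD l2 j ' ') ++ res)
  else
    pvLoop2 l2 j (pvLoop1 l1 i res)
termination_by (i + 1).toNat
decreasing_by omega

def sumOfTwoString (s1 : String) (s2 : String) : String :=
  String.ofList (pvLoopBoth s1.toList s2.toList (PySem.Str.len s1 - 1) (PySem.Str.len s2 - 1) [])

-- ===== PORT B =====
def sumOfTwoString_alt (s1 : String) (s2 : String) : String :=
  let l1 := s1.toList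
  let l2 := s2.toList
  let diff : Int := PySem.Str.len s1 - PySem.Str.len s2
  let p1 := if diff < 0 then List.replicate (-diff).toNat '0' ++ l1 else l1
  let p2 := if 0 < diff then List.replicate diff.toNat '0' ++ l2 else l2
  String.ofList (PySem.Chars.join [] ((p1.zip p2).map (fun p => pvSumStr p.1 p.2)))

-- ===== PRECONDITION & SPEC =====
def Spec_sumOfTwoString (s1 : String) (s2 : String) (out : String) : Prop := out = sumOfTwoString_alt s1 s2
instance (s1 : String) (s2 : String) (out : String) : Decidable (Spec_sumOfTwoString s1 s2 out) := by unfold Spec_sumOfTwoString; infer_instance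

-- ===== CLAIM (what is proved, stated in full; the proofs are below) =====
def Claim_equal_sumOfTwoString : Prop := ∀ (s1 : String) (s2 : String), Dom_sumOfTwoString s1 s2 → Spec_sumOfTwoString s1 s2 (sumOfTwoString s1 s2)

-- ===== LEMMAS AND PROOFS =====

theorem pvJoin_nil_eq_flatten (l : List (List Char)) : PySem.Chars.join [] l = l.flatten := by
  induction l with
  | nil => simp [PySem.Chars.join_nil]
  | cons x xs ih =>
    cases xs with
    | nil => simp [PySem.Chars.join_singleton]
    | cons y ys => rw [PySem.Chars.join_cons_cons]; simp_all

theorem pvLoop1_neg (l : List Char) (i : Int) (res : List Char) (h : i < 0) :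
    pvLoop1 l i res = res := by
  rw [pvLoop1]; simp [show ¬ (0 ≤ i) by omega]

theorem pvLoop2_neg (l : List Char) (j : Int) (res : List Char) (h : j < 0) :
    pvLoop2 l j res = res := by
  rw [pvLoop2]; simp [show ¬ (0 ≤ j) by omega]

theorem pvLoop1_eq (l : List Char) (i : Nat) (hi : i ≤ l.length) (res : List Char) :
    pvLoop1 l ((i : Int) - 1) res = ((l.take i).map pvDigStr).flatten ++ res := by
  induction i generalizing res with
  | zero =>
    have h0 : ((0 : Nat) : Int) - 1 = -1 := by norm_num
    rw [h0, pvLoop1_neg l (-1) res (by norm_num)]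
    simp
  | succ k ih =>
    have hk : k < l.length := by omega
    have hcast : ((k + 1 : Nat) : Int) - 1 = (k : Int) := by push_cast; ring
    rw [hcast, pvLoop1]
    simp only [Int.natCast_nonneg, dif_pos]
    have hget : PySem.List.pyGetD l (k : Int) ' ' = l[k] := by
      simp [PySem.List.pyGetD_natCast, List.getD_eq_getElem?_getD, List.getElem?_eq_getElem hk]
    rw [hget, ih (by omega)]
    have t : List.take (k + 1) l = List.take k l ++ [l[k]] := by
      rw [List.take_add_one, List.getElem?_eq_getElem hk]; rfl
    rw [t]
    simp only [List.map_append, List.flatten_append, List.map_cons, List.map_nil,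
      List.flatten_cons, List.flatten_nil, List.append_nil, List.append_assoc]

theorem pvLoop2_eq (l : List Char) (j : Nat) (hj : j ≤ l.length) (res : List Char) :
    pvLoop2 l ((j : Int) - 1) res = ((l.take j).map pvDigStr).flatten ++ res := by
  induction j generalizing res with
  | zero =>
    have h0 : ((0 : Nat) : Int) - 1 = -1 := by norm_num
    rw [h0, pvLoop2_neg l (-1) res (by norm_num)]
    simp
  | succ k ih =>
    have hk : k < l.length := by omega
    have hcast : ((k + 1 : Nat) : Int) - 1 = (k : Int) := by push_cast; ring
    rw [hcast, pvLoop2]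
    simp only [Int.natCast_nonneg, dif_pos]
    have hget : PySem.List.pyGetD l (k : Int) ' ' = l[k] := by
      simp [PySem.List.pyGetD_natCast, List.getD_eq_getElem?_getD, List.getElem?_eq_getElem hk]
    rw [hget, ih (by omega)]
    have t : List.take (k + 1) l = List.take k l ++ [l[k]] := by
      rw [List.take_add_one, List.getElem?_eq_getElem hk]; rfl
    rw [t]
    simp only [List.map_append, List.flatten_append, List.map_cons, List.map_nil,
      List.flatten_cons, List.flatten_nil, List.append_nil, List.append_assoc]

theorem pvLoopBoth_eq (l1 l2 : List Char) (i j : Nat) (hi : i ≤ l1.length) (hj : j ≤ l2.length)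
    (res : List Char) :
    pvLoopBoth l1 l2 ((i : Int) - 1) ((j : Int) - 1) res =
      pvLoop2 l2 ((j : Int) - (i : Int) - 1)
        (pvLoop1 l1 ((i : Int) - (j : Int) - 1)
          ((List.zipWith pvSumStr ((l1.take i).drop (i - j)) ((l2.take j).drop (j - i))).flatten
            ++ res)) := by
  induction i generalizing j res with
  | zero =>
    rw [pvLoopBoth]
    simp only [show ¬ ((0 : Int) ≤ ((0 : Nat) : Int) - 1 ∧ 0 ≤ (j : Int) - 1) by omega, dif_neg,
      not_false_iff]
    rw [pvLoop1_neg l1 _ res (by omega), pvLoop1_neg l1 _ _ (by omega)]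
    simp
  | succ k ih =>
    cases j with
    | zero =>
      rw [pvLoopBoth]
      simp only [show ¬ ((0 : Int) ≤ ((k + 1 : Nat) : Int) - 1 ∧ 0 ≤ ((0 : Nat) : Int) - 1) by
        omega, dif_neg, not_false_iff]
      rw [pvLoop2_neg l2 _ _ (by omega), pvLoop2_neg l2 _ _ (by omega)]
      simp
    | succ m =>
      have hk : k < l1.length := by omega
      have hm : m < l2.length := by omega
      have c1 : ((k + 1 : Nat) : Int) - 1 = (k : Int) := by push_cast; ring
      have c2 : ((m + 1 : Nat) : Int) - 1 = (m : Int) := by push_cast; ring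
      rw [c1, c2, pvLoopBoth]
      simp only [show ((0 : Int) ≤ (k : Int) ∧ 0 ≤ (m : Int)) by omega]
      have hg1 : PySem.List.pyGetD l1 (k : Int) ' ' = l1[k] := by
        simp [PySem.List.pyGetD_natCast, List.getD_eq_getElem?_getD, List.getElem?_eq_getElem hk]
      have hg2 : PySem.List.pyGetD l2 (m : Int) ' ' = l2[m] := by
        simp [PySem.List.pyGetD_natCast, List.getD_eq_getElem?_getD, List.getElem?_eq_getElem hm]
      rw [hg1, hg2, ih m (by omega) (by omega)]
      have e1 : ((k + 1 : Nat) : Int) - ((m + 1 : Nat) : Int) - 1 = (k : Int) - (m : Int) - 1 := by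
        push_cast; ring
      have e2 : ((m + 1 : Nat) : Int) - ((k + 1 : Nat) : Int) - 1 = (m : Int) - (k : Int) - 1 := by
        push_cast; ring
      rw [e1, e2]
      -- the zipped part grows by one aligned pair at the right end
      have t1 : l1.take (k + 1) = l1.take k ++ [l1[k]] := by
        rw [List.take_add_one, List.getElem?_eq_getElem hk]; rfl
      have t2 : l2.take (m + 1) = l2.take m ++ [l2[m]] := by
        rw [List.take_add_one, List.getElem?_eq_getElem hm]; rfl
      have hs1 : k + 1 - (m + 1) = k - m := by omega
      have hs2 : m + 1 - (k + 1) = m - k := by omega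
      rw [t1, t2, hs1, hs2,
        List.drop_append_of_le_length (by simp [List.length_take]; omega),
        List.drop_append_of_le_length (by simp [List.length_take]; omega),
        List.zipWith_append (by simp [List.length_take]; omega)]
      simp

theorem pvZipWith_replicate_right (f : Char → Char → List Char) (l : List Char) (b : Char) :
    List.zipWith f l (List.replicate l.length b) = l.map (fun a => f a b) := by
  induction l with
  | nil => rfl
  | cons x xs ih => simp [List.replicate_succ, ih]

theorem pvZipWith_replicate_left (f : Char → Char → List Char) (l : List Char) (b : Char) :
    List.zipWith f (List.replicate l.length b) l = l.map (fun a => f b a) := by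
  induction l with
  | nil => rfl
  | cons x xs ih => simp [List.replicate_succ, ih]

theorem pvSumStr_zero_right (a : Char) : pvSumStr a '0' = pvDigStr a := by
  unfold pvSumStr pvDigStr
  have h0 : (('0'.toNat : Int)) = 48 := rfl
  congr 1
  omega

theorem pvSumStr_zero_left (b : Char) : pvSumStr '0' b = pvDigStr b := by
  unfold pvSumStr pvDigStr
  have h0 : (('0'.toNat : Int)) = 48 := rfl
  congr 1
  omega

theorem pvMapZip (f : Char → Char → List Char) (a b : List Char) :
    (a.zip b).map (fun p => f p.1 p.2) = List.zipWith f a b := by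
  simp [List.zip, List.map_zipWith]

-- padding with |pre| zeros pairs pre with '0's and suf with l2
theorem pvZipPad_right (pre suf l2 : List Char) :
    List.zipWith pvSumStr (pre ++ suf) (List.replicate pre.length '0' ++ l2)
      = pre.map pvDigStr ++ List.zipWith pvSumStr suf l2 := by
  rw [List.zipWith_append (by simp), pvZipWith_replicate_right]
  congr 1
  apply List.map_congr_left
  intro a _
  exact pvSumStr_zero_right a

theorem pvZipPad_left (pre suf l1 : List Char) :
    List.zipWith pvSumStr (List.replicate pre.length '0' ++ l1) (pre ++ suf)
      = pre.map pvDigStr ++ List.zipWith pvSumStr l1 suf := by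
  rw [List.zipWith_append (by simp), pvZipWith_replicate_left]
  congr 1
  apply List.map_congr_left
  intro b _
  exact pvSumStr_zero_left b

theorem sumOfTwoString_spec_aux (s1 s2 : String) :
    sumOfTwoString s1 s2 = sumOfTwoString_alt s1 s2 := by
  unfold sumOfTwoString sumOfTwoString_alt
  simp only [PySem.Str.len_eq]
  set l1 := s1.toList with hl1
  set l2 := s2.toList with hl2
  rw [pvLoopBoth_eq l1 l2 l1.length l2.length le_rfl le_rfl []]
  rw [pvJoin_nil_eq_flatten, pvMapZip]
  simp only [List.take_length, List.append_nil]
  rcases le_or_gt l2.length l1.length with hle | hlt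
  · -- len(s1) >= len(s2): the j-loop never runs, the i-loop handles l1's extra prefix
    rw [pvLoop2_neg _ _ _ (by omega)]
    have hd : (l1.length : Int) - (l2.length : Int) - 1
        = ((l1.length - l2.length : Nat) : Int) - 1 := by omega
    rw [hd, pvLoop1_eq l1 (l1.length - l2.length) (by omega)]
    have hif1 : ¬ ((l1.length : Int) - (l2.length : Int) < 0) := by omega
    have hp2 : (if (0 : Int) < (l1.length : Int) - (l2.length : Int) then
          List.replicate ((l1.length : Int) - (l2.length : Int)).toNat '0' ++ l2 else l2)
        = List.replicate (l1.length - l2.length) '0' ++ l2 := by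
      by_cases h0 : l2.length = l1.length
      · simp [h0]
      · rw [if_pos (by omega)]
        congr 2
        omega
    rw [if_neg hif1, hp2]
    have key := pvZipPad_right (l1.take (l1.length - l2.length)) (l1.drop (l1.length - l2.length)) l2
    rw [List.take_append_drop] at key
    have hlen : (l1.take (l1.length - l2.length)).length = l1.length - l2.length := by
      simp
    rw [hlen] at key
    rw [key]
    have hz : l1.length - l2.length - (l2.length - l1.length) = l1.length - l2.length := by omega
    have hz2 : l2.length - l1.length = 0 := by omega
    rw [hz2, List.drop_zero]
    simp
  · -- len(s1) < len(s2): symmetric, the i-loop never runs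
    rw [pvLoop1_neg _ _ _ (by omega)]
    have hd : (l2.length : Int) - (l1.length : Int) - 1
        = ((l2.length - l1.length : Nat) : Int) - 1 := by omega
    rw [hd, pvLoop2_eq l2 (l2.length - l1.length) (by omega)]
    have hz : l1.length - l2.length = 0 := by omega
    rw [hz, List.drop_zero]
    rw [if_pos (by omega), if_neg (by omega)]
    have htn : (-((l1.length : Int) - (l2.length : Int))).toNat = l2.length - l1.length := by
      omega
    rw [htn]
    have key := pvZipPad_left (l2.take (l2.length - l1.length)) (l2.drop (l2.length - l1.length)) l1
    rw [List.take_append_drop] at key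
    have hlen : (l2.take (l2.length - l1.length)).length = l2.length - l1.length := by
      simp
    rw [hlen] at key
    rw [key]
    simp

-- ===== VERDICT (by name: the statement is the Claim_ definition above) =====
theorem sumOfTwoString_spec : Claim_equal_sumOfTwoString := by
  intro s1 s2 _
  unfold Spec_sumOfTwoString
  exact sumOfTwoString_spec_aux s1 s2
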